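-- pv_equiv track=rewrite | github.com/So-Myoung/algorithm-exercises-python | 알고리즘/5_그리드/프로그래머스 고득점 kit/5_2.py | solution
-- ===== SOURCE A (Python) =====
-- def solution(name):
--     change_move = 0
--     cursor_move = len(name) - 1
--
--     for i, s in enumerate(name):
--         # 알파벳 변경 이동(상하) 최소값 찾기
--         change_move += min(ord(s) - ord('A'), ord('Z') - ord(s) + 1)
--
--         # 커서 이동(좌우)의 최소값을 찾기 위한 연속된 A 문자열 찾기, next는 마지막 A 다음 index
--         next = i + 1
--         while next < len(name) and name[next] == 'A':
--             next += 1
--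
--         # 커서 이동(좌우) 최소값 갱신
--         cursor_move = min([cursor_move, 2 * i + (len(name) - next), 2 * (len(name) - next) + i])
--
--     return change_move + cursor_move
-- ===== SOURCE B (Python) =====
-- def solution(name):
--     n = len(name)
--     change = 0
--     cursor = n - 1
--     k = n  # index of the first non-'A' character strictly after the current position (n if none)
--     for i in range(n - 1, -1, -1):
--         o = ord(name[i])
--         change += min(o - 65, 91 - o)
--         cursor = min(cursor, 2 * i + n - k, 2 * (n - k) + i)
--         if name[i] != 'A':
--             k = i
--     return change + cursor
-- ===== Notes on version B (the rewrite author's own statement) =====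
-- stated objective: alternative
-- what changed: Replaced the per-index inner while-loop that rescans the following run of letter-A characters with a single backward pass that carries the index of the next non-A character in an accumulator, folding change, cursor and that index in one loop.
import Mathlib
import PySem

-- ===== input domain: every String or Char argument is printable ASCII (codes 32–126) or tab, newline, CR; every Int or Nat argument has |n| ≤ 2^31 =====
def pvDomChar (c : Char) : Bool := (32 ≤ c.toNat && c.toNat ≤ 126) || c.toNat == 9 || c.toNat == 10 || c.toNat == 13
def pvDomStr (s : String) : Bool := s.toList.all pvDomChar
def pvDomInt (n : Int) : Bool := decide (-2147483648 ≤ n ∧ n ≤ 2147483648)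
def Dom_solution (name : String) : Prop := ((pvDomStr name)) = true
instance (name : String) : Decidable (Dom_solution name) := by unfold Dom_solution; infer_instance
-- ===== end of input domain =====

-- B replaces A's inner while-loop (rescanning the run of letter-A characters after every index)
-- by a single backward pass carrying the next non-A index in an accumulator; objective: alternative.

-- ===== PORT A =====
-- the inner while-loop of A (advance past consecutive A characters)
def aNext (cs : List Char) (j : Nat) : Nat :=
  if h : j < cs.length then
    (if cs[j] = 'A' then aNext cs (j + 1) else j)
  else cs.length
termination_by cs.length - j

-- A's for-loop over `enumerate(name)`, state (change_move, cursor_move)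
def aLoop (cs : List Char) (n : Int) : List Char → Nat → Int × Int → Int × Int
  | [], _, st => st
  | s :: rest, i, (change, cursor) =>
      let change := change + min ((s.toNat : Int) - 65) (90 - (s.toNat : Int) + 1)
      let nxt : Int := aNext cs (i + 1)
      let cursor := min (min cursor (2 * (i : Int) + (n - nxt))) (2 * (n - nxt) + (i : Int))
      aLoop cs n rest (i + 1) (change, cursor)

def solution (name : String) : Int :=
  let cs := name.toList
  let n : Int := cs.length
  let st := aLoop cs n cs 0 (0, n - 1)
  st.1 + st.2

-- ===== PORT B =====
-- B's single backward pass over range(n-1,-1,-1), state (change, cursor, k):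
-- the recursion computes the suffix (larger indices, which Python visits first) and then does step i.
def bLoop (n : Int) : List Char → Nat → Int × Int × Int
  | [], _ => (0, n - 1, n)
  | c :: rest, i =>
      let st := bLoop n rest (i + 1)
      let o : Int := c.toNat
      (st.1 + min (o - 65) (91 - o),
       min (min st.2.1 (2 * (i : Int) + n - st.2.2)) (2 * (n - st.2.2) + (i : Int)),
       if c ≠ 'A' then (i : Int) else st.2.2)

def solution_alt (name : String) : Int :=
  let cs := name.toList
  let n : Int := cs.length
  let st := bLoop n cs 0
  st.1 + st.2.1

-- ===== PRECONDITION & SPEC =====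
def Spec_solution (name : String) (out : Int) : Prop := out = solution_alt name
instance (name : String) (out : Int) : Decidable (Spec_solution name out) := by unfold Spec_solution; infer_instance

-- ===== CLAIM (what is proved, stated in full; the proofs are below) =====
def Claim_equal_solution : Prop := ∀ (name : String), Dom_solution name → Spec_solution name (solution name)

-- ===== LEMMAS AND PROOFS =====

-- the per-index change contribution and cursor term
def chg (c : Char) : Int := min ((c.toNat : Int) - 65) (90 - (c.toNat : Int) + 1)

def trm (cs : List Char) (n : Int) (j : Nat) : Int :=
  let nxt : Int := aNext cs (j + 1)
  min (2 * (j : Int) + (n - nxt)) (2 * (n - nxt) + (j : Int))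

lemma aNext_stop (cs : List Char) (j : Nat) (h : ¬ j < cs.length) : aNext cs j = cs.length := by
  rw [aNext]; simp [h]

lemma aNext_step (cs : List Char) (j : Nat) (h : j < cs.length) :
    aNext cs j = (if cs[j] = 'A' then aNext cs (j + 1) else j) := by
  rw [aNext]; simp [h]

lemma aLoop_char (cs : List Char) (n : Int) :
    ∀ (m i : Nat) (ch cur : Int), cs.length - i = m →
      aLoop cs n (cs.drop i) i (ch, cur) =
        (ch + (((List.range' i m).map (fun j => chg cs[j]!)).sum),
         ((List.range' i m).map (trm cs n)).foldl min cur) := by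
  intro m
  induction m with
  | zero =>
      intro i ch cur h
      have : cs.length ≤ i := by omega
      simp [List.drop_eq_nil_of_le this, aLoop]
  | succ m ih =>
      intro i ch cur h
      have hi : i < cs.length := by omega
      rw [List.drop_eq_getElem_cons hi]
      simp only [aLoop, List.range'_succ, List.map_cons, List.sum_cons, List.foldl_cons]
      rw [ih (i + 1) _ _ (by omega)]
      simp only [Prod.mk.injEq]
      refine ⟨?_, ?_⟩
      · have : cs[i]! = cs[i] := by exact getElem!_pos cs i hi
        simp [chg, this]; ring
      · congr 1
        simp [trm, min_assoc]

lemma bLoop_char (cs : List Char) (n : Int) (hn : n = (cs.length : Int)) :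
    ∀ (m i : Nat), cs.length - i = m →
      bLoop n (cs.drop i) i =
        ((((List.range' i m).map (fun j => chg cs[j]!)).sum),
         ((List.range' i m).map (trm cs n)).foldr (fun t acc => min acc t) (n - 1),
         (aNext cs i : Int)) := by
  intro m
  induction m with
  | zero =>
      intro i h
      have hle : cs.length ≤ i := by omega
      simp [List.drop_eq_nil_of_le hle, bLoop, aNext_stop cs i (by omega), hn]
  | succ m ih =>
      intro i h
      have hi : i < cs.length := by omega
      rw [List.drop_eq_getElem_cons hi]
      simp only [bLoop, List.range'_succ, List.map_cons, List.sum_cons, List.foldr_cons]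
      rw [ih (i + 1) (by omega)]
      simp only [Prod.mk.injEq]
      refine ⟨?_, ?_, ?_⟩
      · have : cs[i]! = cs[i] := by exact getElem!_pos cs i hi
        simp only [this, chg]
        have : (90 : Int) - (cs[i].toNat : Int) + 1 = 91 - (cs[i].toNat : Int) := by ring
        rw [this]; ring
      · have h2 : 2 * (i : Int) + n - (aNext cs (i + 1) : Int)
            = 2 * (i : Int) + (n - (aNext cs (i + 1) : Int)) := by ring
        rw [h2]; simp [trm, min_assoc]
      · rw [aNext_step cs i hi]
        by_cases hA : cs[i] = 'A' <;> simp [hA]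

lemma foldl_min_aux (l : List Int) : ∀ (a x : Int), l.foldl min (min a x) = min (l.foldl min a) x := by
  induction l with
  | nil => intro a x; simp
  | cons y t ih =>
      intro a x
      simp only [List.foldl_cons]
      rw [show min (min a x) y = min (min a y) x by
        rw [min_assoc, min_comm x y, ← min_assoc], ih]

lemma foldl_min_eq_foldr (l : List Int) (a : Int) :
    l.foldl min a = l.foldr (fun t acc => min acc t) a := by
  induction l generalizing a with
  | nil => rfl
  | cons x t ih => simp only [List.foldl_cons, List.foldr_cons, ← ih, foldl_min_aux]

-- ===== VERDICT (by name: the statement is the Claim_ definition above) =====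
theorem solution_spec : Claim_equal_solution := by
  intro name _
  unfold Spec_solution solution solution_alt
  have ha := aLoop_char name.toList (name.toList.length : Int) name.toList.length 0 0
    ((name.toList.length : Int) - 1) (by omega)
  have hb := bLoop_char name.toList (name.toList.length : Int) rfl name.toList.length 0 (by omega)
  simp only [List.drop_zero] at ha hb
  simp only [ha, hb, zero_add, foldl_min_eq_foldr]
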